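-- pv_equiv track=rewrite | github.com/apreeti2001/Invincix-problem-statement-2 | index.py | max_A_index
-- ===== SOURCE A (Python) =====
-- def max_A_index(arr,n):
--
-- 	# for maximum number of A around B
-- 	max_count = 0
--
-- 	# for storing result
-- 	max_index =0
--
-- 	# index of previous B
-- 	prev_b = -1
--
-- 	# index of previous to previous B
-- 	prev_prev_b = -1
--
-- 	# Traverse the input array
-- 	for curr in range(n):
--
-- 		# If current element is B,
-- 		# then calculate the difference
-- 		# between curr and prev_prev_b
-- 		if (arr[curr] == 'B'):
--
-- 			# Update result if count of
-- 			# 1s around prev_b is more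
-- 			if (curr - prev_prev_b > max_count):
--
-- 				max_count = curr - prev_prev_b
-- 				max_index = prev_b
--
--
-- 			# Update for next iteration
-- 			prev_prev_b = prev_b
-- 			prev_b = curr
--
-- 	# Check for the last encountered B
-- 	if (n-prev_prev_b > max_count):
-- 		max_index = prev_b
--
-- 	return max_index
-- ===== SOURCE B (Python) =====
-- def max_A_index(arr, n):
--     # indices of every 'B' among the first n elements
--     pos = [i for i in range(n) if arr[i] == 'B']
--     if not pos:
--         return -1
--     best = -1
--     best_span = 0
--     # span around each B = next B (or n) minus previous B (or -1);
--     # strict '>' keeps the leftmost B on ties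
--     for b, prv, nxt in zip(pos, [-1] + pos[:-1], pos[1:] + [n]):
--         span = nxt - prv
--         if span > best_span:
--             best_span = span
--             best = b
--     return best
-- ===== Notes on version B (the rewrite author's own statement) =====
-- stated objective: alternative
-- what changed: B replaces A's stateful single scan (four rolling variables prev_b/prev_prev_b/max_count/max_index plus a post-loop fixup) by first collecting the list of B-positions and then one pass over that list zipped with its sentinel-padded neighbours, picking the position whose neighbour span is largest (strict > keeps the leftmost).
-- outside the precondition, e.g. on max_A_index([], -1): A returns 0, B returns -1; on max_A_index(['B'], -2): A returns 0, B returns -1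
import Mathlib
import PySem

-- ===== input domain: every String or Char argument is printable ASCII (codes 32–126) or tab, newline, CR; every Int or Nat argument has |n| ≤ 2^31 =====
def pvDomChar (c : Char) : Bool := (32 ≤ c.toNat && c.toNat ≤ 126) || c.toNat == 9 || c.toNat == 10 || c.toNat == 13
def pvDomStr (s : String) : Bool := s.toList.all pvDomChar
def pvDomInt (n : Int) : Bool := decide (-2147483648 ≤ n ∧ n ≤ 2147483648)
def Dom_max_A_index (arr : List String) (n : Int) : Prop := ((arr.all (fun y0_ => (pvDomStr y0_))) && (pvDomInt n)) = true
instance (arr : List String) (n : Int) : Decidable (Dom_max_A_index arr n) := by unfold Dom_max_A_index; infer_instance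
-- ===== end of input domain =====

-- B collects the B-positions once and scans them zipped with their sentinel-padded
-- neighbours (alternative decomposition, same O(n) cost); return value only.

-- ===== PORT A =====
-- loop body of A for a 'B' element; state = ((max_count, max_index), prev_b, prev_prev_b)
def pvStepA (st : (Int × Int) × Int × Int) (curr : Int) : (Int × Int) × Int × Int :=
  if curr - st.2.2 > st.1.1 then ((curr - st.2.2, st.2.1), curr, st.2.1)
  else (st.1, curr, st.2.1)

def max_A_index (arr : List String) (n : Int) : Int :=
  let s := (PySem.List.pyRange 0 n 1).foldl
    (fun st curr =>
      if PySem.List.pyGetD arr curr "" == "B" then pvStepA st curr else st)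
    ((0, 0), -1, -1)
  if n - s.2.2 > s.1.1 then s.2.1 else s.1.2

-- ===== PORT B =====
-- loop body of B; state = (best_span, best), triple t = ((b, prv), nxt)
def pvStepB (s : Int × Int) (t : (Int × Int) × Int) : Int × Int :=
  let span := t.2 - t.1.2
  if span > s.1 then (span, t.1.1) else s

def max_A_index_alt (arr : List String) (n : Int) : Int :=
  let pos := (PySem.List.pyRange 0 n 1).filter
    (fun i => PySem.List.pyGetD arr i "" == "B")
  if pos = [] then -1
  else
    let s := ((pos.zip ((-1) :: PySem.List.slice pos none (some (-1)))).zip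
              (PySem.List.slice pos (some 1) none ++ [n])).foldl pvStepB (0, -1)
    s.2

-- ===== PRECONDITION & SPEC =====
-- Pre_ excludes n > len(arr), where A raises IndexError at arr[curr], and negative n,
-- which is outside the natural domain of an element count (there A returns its
-- never-updated initial max_index 0 while B returns its no-B sentinel -1).
def Pre_max_A_index (arr : List String) (n : Int) : Prop := 0 ≤ n ∧ n ≤ (arr.length : Int)
instance (arr : List String) (n : Int) : Decidable (Pre_max_A_index arr n) := by
  unfold Pre_max_A_index; infer_instance
def pvWitness_max_A_index : List String × Int := (["A", "B", "A"], 3)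

def Spec_max_A_index (arr : List String) (n : Int) (out : Int) : Prop :=
  out = max_A_index_alt arr n
instance (arr : List String) (n : Int) (out : Int) : Decidable (Spec_max_A_index arr n out) := by
  unfold Spec_max_A_index; infer_instance

-- ===== CLAIM (what is proved, stated in full; the proofs are below) =====
def Claim_equal_max_A_index : Prop := ∀ (arr : List String) (n : Int), Dom_max_A_index arr n → Pre_max_A_index arr n → Spec_max_A_index arr n (max_A_index arr n)

-- ===== LEMMAS AND PROOFS =====

-- choose the better (span, index) candidate, strict '>' (leftmost wins)
def pvCh (s c : Int × Int) : Int × Int := if c.1 > s.1 then c else s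

-- candidate list: for each position p, (span to neighbours with sentinels prev/nn, p)
def pvCands (nn : Int) : Int → List Int → List (Int × Int)
  | _, [] => []
  | prev, [p] => [(nn - prev, p)]
  | prev, p :: q :: rest => (q - prev, p) :: pvCands nn p (q :: rest)

-- a conditional fold is a fold over the filtered list
theorem pv_foldl_if_filter {α β : Type} (P : α → Bool) (g : β → α → β) :
    ∀ (l : List α) (init : β),
      l.foldl (fun st x => if P x then g st x else st) init = (l.filter P).foldl g init := by
  intro l
  induction l with
  | nil => intro init; rfl
  | cons x xs ih =>
    intro init
    by_cases h : P x <;> simp [List.foldl_cons, h, ih]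

-- A's fold-then-fixup over positions is the candidate fold
theorem pv_A_fold (nn : Int) :
    ∀ (ps : List Int) (s : Int × Int) (pb ppb : Int),
      (fun st : (Int × Int) × Int × Int =>
        if nn - st.2.2 > st.1.1 then st.2.1 else st.1.2)
        (ps.foldl pvStepA (s, pb, ppb))
      = (List.foldl pvCh s (pvCands nn ppb (pb :: ps))).2 := by
  intro ps
  induction ps with
  | nil =>
    intro s pb ppb
    simp only [List.foldl_nil, pvCands, List.foldl_cons, pvCh]
    split <;> rfl
  | cons p rest ih =>
    intro s pb ppb
    have hstep : pvStepA (s, pb, ppb) p = (pvCh s (p - ppb, pb), p, pb) := by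
      simp only [pvStepA, pvCh]; split <;> rfl
    calc (fun st : (Int × Int) × Int × Int =>
            if nn - st.2.2 > st.1.1 then st.2.1 else st.1.2)
          ((p :: rest).foldl pvStepA (s, pb, ppb))
        = (fun st : (Int × Int) × Int × Int =>
            if nn - st.2.2 > st.1.1 then st.2.1 else st.1.2)
          (rest.foldl pvStepA (pvCh s (p - ppb, pb), p, pb)) := by
          rw [List.foldl_cons, hstep]
      _ = (List.foldl pvCh (pvCh s (p - ppb, pb)) (pvCands nn pb (p :: rest))).2 := ih _ _ _
      _ = (List.foldl pvCh s (pvCands nn ppb (pb :: p :: rest))).2 := by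
          simp [pvCands, List.foldl_cons]

-- B's fold over the zipped neighbour triples is the candidate fold
theorem pv_B_fold (nn : Int) :
    ∀ (ps : List Int) (p prev : Int) (s : Int × Int),
      (((p :: ps).zip (prev :: (p :: ps).dropLast)).zip ((p :: ps).tail ++ [nn])).foldl
        pvStepB s
      = List.foldl pvCh s (pvCands nn prev (p :: ps)) := by
  intro ps
  induction ps with
  | nil =>
    intro p prev s
    simp only [List.dropLast, List.zip_cons_cons, List.zip_nil_right, List.nil_append, List.foldl_cons, List.foldl_nil, List.tail_cons, pvCands, pvStepB, pvCh]
  | cons q rest ih =>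
    intro p prev s
    have h1 : (p :: q :: rest).dropLast = p :: (q :: rest).dropLast := rfl
    have h2 : (p :: q :: rest).drop 1 ++ [nn] = q :: ((q :: rest).drop 1 ++ [nn]) := by
      simp
    show List.foldl pvStepB (pvStepB s ((p, prev), q))
        (((q :: rest).zip (p :: (q :: rest).dropLast)).zip ((q :: rest).tail ++ [nn]))
      = List.foldl pvCh s (pvCands nn prev (p :: q :: rest))
    rw [show pvStepB s ((p, prev), q) = pvCh s (q - prev, p) from rfl]
    rw [ih q p (pvCh s (q - prev, p))]
    rfl

-- the initial best_span only matters until the first accepted candidate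
theorem pv_choose_head (c : Int × Int) (cs : List (Int × Int)) (a b x y : Int)
    (h1 : a < c.1) (h2 : b < c.1) :
    (List.foldl pvCh (a, x) (c :: cs)).2 = (List.foldl pvCh (b, y) (c :: cs)).2 := by
  have ha : pvCh (a, x) c = c := by simp [pvCh]; omega
  have hb : pvCh (b, y) c = c := by simp [pvCh]; omega
  rw [List.foldl_cons, List.foldl_cons, ha, hb]

-- the assembled equivalence over an abstract sorted bounded position list
theorem pv_main (n : Int) (pos : List Int) (hn : 0 ≤ n)
    (hmem : ∀ p ∈ pos, 0 ≤ p ∧ p < n) (hpair : pos.Pairwise (· < ·)) :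
    (if n - (List.foldl pvStepA ((0, 0), -1, -1) pos).2.2
          > (List.foldl pvStepA ((0, 0), -1, -1) pos).1.1
     then (List.foldl pvStepA ((0, 0), -1, -1) pos).2.1
     else (List.foldl pvStepA ((0, 0), -1, -1) pos).1.2)
    = (if pos = [] then -1
       else (List.foldl pvStepB (0, -1)
              ((pos.zip ((-1) :: pos.dropLast)).zip (pos.tail ++ [n]))).2) := by
  cases pos with
  | nil =>
    simp only [List.foldl_nil]
    have hgt : n - (-1 : Int) > 0 := by omega
    rw [if_pos hgt]
    simp
  | cons p0 rest =>
    have hA := pv_A_fold n (p0 :: rest) ((0 : Int), (0 : Int)) (-1) (-1)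
    simp only at hA
    rw [hA]
    have hne : ¬ (p0 :: rest = ([] : List Int)) := by simp
    rw [if_neg hne]
    rw [pv_B_fold n rest p0 (-1) ((0 : Int), (-1 : Int))]
    have hc0 : pvCands n (-1) ((-1 : Int) :: p0 :: rest)
        = (p0 - (-1), -1) :: pvCands n (-1) (p0 :: rest) := rfl
    rw [hc0]
    have hp0 : 0 ≤ p0 ∧ p0 < n := hmem p0 (List.mem_cons_self ..)
    rw [List.foldl_cons]
    have hch : pvCh ((0 : Int), (0 : Int)) (p0 - (-1), -1) = (p0 + 1, -1) := by
      simp [pvCh]; omega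
    rw [hch]
    cases rest with
    | nil =>
      have h1 : (p0 + 1 : Int) < n - (-1) := by omega
      have h2 : (0 : Int) < n - (-1) := by omega
      exact pv_choose_head (n - (-1), p0) [] (p0 + 1) 0 (-1) (-1) h1 h2
    | cons p1 r =>
      have hlt : p0 < p1 := (List.pairwise_cons.1 hpair).1 p1 (List.mem_cons_self ..)
      have hp1 : 0 ≤ p1 ∧ p1 < n := hmem p1 (by simp)
      have hc1 : pvCands n (-1) (p0 :: p1 :: r)
          = (p1 - (-1), p0) :: pvCands n p0 (p1 :: r) := rfl
      rw [hc1]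
      have h1 : (p0 + 1 : Int) < p1 - (-1) := by omega
      have h2 : (0 : Int) < p1 - (-1) := by omega
      exact pv_choose_head (p1 - (-1), p0) _ (p0 + 1) 0 (-1) (-1) h1 h2

theorem max_A_index_spec : Claim_equal_max_A_index := by
  intro arr n _hdom hpre
  have hn : 0 ≤ n := hpre.1
  unfold Spec_max_A_index
  unfold max_A_index max_A_index_alt
  simp only [PySem.List.slice_to_neg_one, PySem.List.slice_from_one]
  rw [pv_foldl_if_filter (fun i => PySem.List.pyGetD arr i "" == "B") pvStepA]
  refine pv_main n _ hn ?_ ?_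
  · intro p hp
    have h1 := List.mem_of_mem_filter hp
    have h2 := (PySem.List.mem_pyRange_one).1 h1
    omega
  · exact List.Pairwise.filter _ (PySem.List.pairwise_lt_pyRange_one 0 n)
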